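-- pv_equiv track=rewrite | github.com/williamw04/NichesNooksAndCrannies | src/shared/utils/validation.py | validate_tags
-- ===== SOURCE A (Python) =====
-- def validate_tags(tags: list[str]) -> tuple[bool, str]:
--     if len(tags) < 6:
--         return False, f"Not enough tags (min 6, got {len(tags)})"
--
--     if len(tags) > 12:
--         return False, f"Too many tags (max 12, got {len(tags)})"
--
--     unique_tags = set(tag.lower().strip() for tag in tags)
--     if len(unique_tags) != len(tags):
--         return False, "Duplicate tags found"
--
--     return True, "Valid"
-- ===== SOURCE B (Python) =====
-- def validate_tags(tags: list[str]) -> tuple[bool, str]: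
--     n = len(tags)
--     if not (6 <= n <= 12):
--         if n < 6:
--             return False, f"Not enough tags (min 6, got {n})"
--         return False, f"Too many tags (max 12, got {n})"
--     seen = []
--     for tag in tags:
--         norm = tag.lower().strip()
--         if norm in seen:
--             return False, "Duplicate tags found"
--         seen.append(norm)
--     return True, "Valid"
-- ===== Notes on version B (the rewrite author's own statement) =====
-- stated objective: alternative
-- what changed: Replaces A's build-a-set-then-compare-sizes uniqueness test with a single early-exit pass that normalizes each tag in turn and checks it against an accumulator list of tags seen so far.
import Mathlib
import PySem

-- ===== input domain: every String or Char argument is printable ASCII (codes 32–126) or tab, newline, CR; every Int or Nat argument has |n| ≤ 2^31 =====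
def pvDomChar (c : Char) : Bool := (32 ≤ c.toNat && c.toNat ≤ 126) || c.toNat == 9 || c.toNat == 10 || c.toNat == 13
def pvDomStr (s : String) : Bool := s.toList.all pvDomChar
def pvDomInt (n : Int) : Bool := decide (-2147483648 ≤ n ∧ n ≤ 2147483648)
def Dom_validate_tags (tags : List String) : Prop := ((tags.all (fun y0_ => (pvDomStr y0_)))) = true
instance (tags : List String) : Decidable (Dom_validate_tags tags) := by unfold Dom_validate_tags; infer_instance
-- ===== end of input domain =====

-- B replaces A's build-a-set-then-compare-sizes uniqueness test by a single early-exit pass over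
-- the tags with an accumulator of normalized tags seen so far (alternative decomposition, same results).

-- ===== PORT A =====
def validate_tags (tags : List String) : Bool × String :=
  if tags.length < 6 then
    (false, "Not enough tags (min 6, got " ++ PySem.Int.toStr (tags.length : Int) ++ ")")
  else if tags.length > 12 then
    (false, "Too many tags (max 12, got " ++ PySem.Int.toStr (tags.length : Int) ++ ")")
  else
    let unique_tags := PySem.Set.ofList (tags.map (fun tag => PySem.Str.strip (PySem.Str.lower tag)))
    if (unique_tags.length : Int) ≠ (tags.length : Int) then
      (false, "Duplicate tags found")
    else
      (true, "Valid")

-- ===== PORT B =====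
-- Source B's 'for tag in tags' loop with the 'seen' accumulator; returns (true, "Valid") when the
-- loop falls through, or the early return on the first duplicate.
def pvScanTags (seen : List String) : List String → Bool × String
  | [] => (true, "Valid")
  | tag :: rest =>
    let norm := PySem.Str.strip (PySem.Str.lower tag)
    if seen.contains norm then (false, "Duplicate tags found")
    else pvScanTags (seen ++ [norm]) rest

def validate_tags_alt (tags : List String) : Bool × String :=
  let n := tags.length
  if ¬ (6 ≤ n ∧ n ≤ 12) then
    if n < 6 then
      (false, "Not enough tags (min 6, got " ++ PySem.Int.toStr (n : Int) ++ ")")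
    else
      (false, "Too many tags (max 12, got " ++ PySem.Int.toStr (n : Int) ++ ")")
  else
    pvScanTags [] tags

-- ===== PRECONDITION & SPEC =====
def Spec_validate_tags (tags : List String) (out : Bool × String) : Prop := out = validate_tags_alt tags
instance (tags : List String) (out : Bool × String) : Decidable (Spec_validate_tags tags out) := by unfold Spec_validate_tags; infer_instance

-- ===== CLAIM =====
def Claim_equal_validate_tags : Prop := ∀ (tags : List String), Dom_validate_tags tags → Spec_validate_tags tags (validate_tags tags)

-- ===== LEMMAS AND PROOFS =====

-- the scan returns (true, "Valid") iff the normalized tags are pairwise distinct and avoid 'seen'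
theorem pvScanTags_characterization (l : List String) : ∀ (seen : List String),
    pvScanTags seen l =
      (if (l.map (fun tag => PySem.Str.strip (PySem.Str.lower tag))).Nodup ∧
          (∀ x ∈ l.map (fun tag => PySem.Str.strip (PySem.Str.lower tag)), x ∉ seen)
       then (true, "Valid") else (false, "Duplicate tags found")) := by
  induction l with
  | nil => intro seen; simp [pvScanTags]
  | cons tag rest ih =>
    intro seen
    simp only [pvScanTags, List.map_cons]
    by_cases hmem : seen.contains (PySem.Str.strip (PySem.Str.lower tag))
    · have : PySem.Str.strip (PySem.Str.lower tag) ∈ seen := by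
        simpa using hmem
      rw [if_pos hmem, if_neg]
      rintro ⟨-, hall⟩
      exact hall _ (List.mem_cons_self ..) this
    · have hnm : PySem.Str.strip (PySem.Str.lower tag) ∉ seen := by
        simpa using hmem
      rw [if_neg hmem, ih]
      congr 1
      simp only [List.nodup_cons, List.mem_cons, List.mem_append,
        eq_iff_iff]
      constructor
      · rintro ⟨hnd, hall⟩
        refine ⟨⟨fun hc => ?_, hnd⟩, fun x hx hc => ?_⟩
        · exact hall _ hc (Or.inr (Or.inl rfl))
        · rcases hx with rfl | hx
          · exact hnm hc
          · exact hall _ hx (Or.inl hc)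
      · rintro ⟨⟨hhd, hnd⟩, hall⟩
        refine ⟨hnd, fun x hx hc => ?_⟩
        rcases hc with hc | hc | hc
        · exact hall x (Or.inr hx) hc
        · exact hhd (hc ▸ hx)
        · simp at hc

-- A's set-size test detects exactly the presence of a duplicate among the normalized tags
theorem pv_set_size_nodup (l : List String) :
    ((PySem.Set.ofList l).length = l.length ↔ l.Nodup) := by
  constructor
  · intro hlen
    by_contra hnd
    have h1 : (PySem.Set.ofList l).toFinset = l.toFinset := by
      ext x; simp [List.mem_toFinset, PySem.Set.mem_ofList]
    have h2 : (PySem.Set.ofList l).toFinset.card = (PySem.Set.ofList l).length :=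
      List.toFinset_card_of_nodup (PySem.Set.nodup_ofList l)
    have h4 : l.toFinset.card = l.length ↔ l.Nodup := by
      simpa using @Multiset.toFinset_card_eq_card_iff_nodup _ _ (l : Multiset String)
    have h5 : l.toFinset.card = l.length := by rw [← h1, h2, hlen]
    exact hnd (h4.mp h5)
  · intro hnd
    rw [PySem.Set.ofList_eq_self_of_nodup l hnd]

-- ===== VERDICT =====
theorem validate_tags_spec : Claim_equal_validate_tags := by
  intro tags _
  unfold Spec_validate_tags validate_tags validate_tags_alt
  by_cases h1 : tags.length < 6
  · have : ¬ (6 ≤ tags.length ∧ tags.length ≤ 12) := by omega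
    simp [h1, this]
  · by_cases h2 : tags.length > 12
    · have : ¬ (6 ≤ tags.length ∧ tags.length ≤ 12) := by omega
      simp only [if_neg h1, if_pos h2, if_pos this]
    · have hin : 6 ≤ tags.length ∧ tags.length ≤ 12 := by omega
      simp only [if_neg h1, if_neg h2, if_neg (not_not_intro hin)]
      rw [pvScanTags_characterization]
      set L := tags.map (fun tag => PySem.Str.strip (PySem.Str.lower tag)) with hL
      have hlen : L.length = tags.length := by simp [hL]
      by_cases hnd : L.Nodup
      · have heq : (PySem.Set.ofList L).length = L.length := (pv_set_size_nodup L).mpr hnd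
        rw [if_neg, if_pos]
        · exact ⟨hnd, by simp⟩
        · rw [heq, hlen]; simp
      · have hne : (PySem.Set.ofList L).length ≠ L.length :=
          fun h => hnd ((pv_set_size_nodup L).mp h)
        rw [if_pos, if_neg]
        · rintro ⟨h, -⟩; exact hnd h
        · rw [hlen] at hne; exact_mod_cast hne
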